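-- pv_equiv track=rewrite | github.com/shrechochek/truffle | encoders.py | encode_base45
-- ===== SOURCE A (Python) =====
-- def encode_base45(data: str) -> str:
--     ALPHABET = "0123456789ABCDEFGHIJKLMNOPQRSTUVWXYZ $%*+-./:"
--     if isinstance(data, str): data = data.encode('utf-8')
--
--     result = ""
--     for i in range(0, len(data) - 1, 2):
--         val = (data[i] << 8) + data[i+1]
--
--         c, rem = divmod(val, 45 * 45)
--         b, a = divmod(rem, 45)
--         result += ALPHABET[a] + ALPHABET[b] + ALPHABET[c]
--
--     if len(data) % 2 != 0:
--         val = data[-1]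
--         b, a = divmod(val, 45)
--         result += ALPHABET[a] + ALPHABET[b]
--
--     return result
-- ===== SOURCE B (Python) =====
-- def encode_base45(data: str) -> str:
--     ALPHABET = "0123456789ABCDEFGHIJKLMNOPQRSTUVWXYZ $%*+-./:"
--     if isinstance(data, str): data = data.encode('utf-8')
--     n = len(data)
--     full = n // 2
--     out = []
--     for j in range(3 * full + 2 * (n % 2)):
--         if j < 3 * full:
--             k, p = divmod(j, 3)
--             val = (data[2 * k] << 8) + data[2 * k + 1]
--         else:
--             p, val = j - 3 * full, data[n - 1]
--         out.append(ALPHABET[val // 45 ** p % 45])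
--     return ''.join(out)
-- ===== Notes on version B (the rewrite author's own statement) =====
-- stated objective: alternative
-- what changed: A accumulates the output sequentially, per 2-byte pair, via chained divmods plus a separate trailing-byte branch; B first computes the output length 3*(n//2)+2*(n%2) and then generates each output character independently by position: character j is ALPHABET[val // 45**p % 45] where the chunk, digit position p and val are recovered from j by divmod(j,3) - positional random access instead of sequential divmod chains, no post-loop branch.
import Mathlib
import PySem

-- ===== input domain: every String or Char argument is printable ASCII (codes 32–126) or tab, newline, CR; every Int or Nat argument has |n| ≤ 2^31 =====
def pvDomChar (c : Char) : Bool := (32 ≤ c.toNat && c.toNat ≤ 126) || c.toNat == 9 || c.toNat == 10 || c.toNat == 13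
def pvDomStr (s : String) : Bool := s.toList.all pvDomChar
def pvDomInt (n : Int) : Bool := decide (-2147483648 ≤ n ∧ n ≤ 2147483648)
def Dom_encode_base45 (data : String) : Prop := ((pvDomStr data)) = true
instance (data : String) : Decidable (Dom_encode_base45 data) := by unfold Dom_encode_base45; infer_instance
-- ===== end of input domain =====

-- B replaces A's sequential per-pair divmod accumulation (plus trailing-byte branch) by positional
-- generation: each output character j is computed independently as ALPHABET[val // 45**p % 45]
-- (alternative decomposition, same cost).

-- ===== PORT A =====
-- the shared Base45 alphabet constant
def b45Alphabet : List Char := "0123456789ABCDEFGHIJKLMNOPQRSTUVWXYZ $%*+-./:".toList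

-- on Dom (ASCII), data.encode('utf-8') is exactly the list of character codes
def b45AChars (bytes : List Int) : List Char :=
  let result := (PySem.List.pyRange 0 (PySem.List.len bytes - 1) 2).foldl
    (fun (result : List Char) (i : Int) =>
      let val := PySem.List.pyGetD bytes i 0 <<< (8 : Nat) + PySem.List.pyGetD bytes (i + 1) 0
      let c := PySem.Int.floordiv val (45 * 45)
      let rem := PySem.Int.mod val (45 * 45)
      let b := PySem.Int.floordiv rem 45
      let a := PySem.Int.mod rem 45
      result ++ [PySem.List.pyGetD b45Alphabet a ' ', PySem.List.pyGetD b45Alphabet b ' ',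
        PySem.List.pyGetD b45Alphabet c ' ']) []
  if PySem.Int.mod (PySem.List.len bytes) 2 ≠ 0 then
    let val := PySem.List.pyGetD bytes (-1) 0
    result ++ [PySem.List.pyGetD b45Alphabet (PySem.Int.mod val 45) ' ',
      PySem.List.pyGetD b45Alphabet (PySem.Int.floordiv val 45) ' ']
  else result

def encode_base45 (data : String) : String :=
  String.ofList (b45AChars (data.toList.map (fun c => (c.toNat : Int))))

-- ===== PORT B =====
-- the loop body: output character at position j (Python: ALPHABET[val // 45 ** p % 45];
-- p = j % 3 resp. j - 3*full is nonnegative, so 45 ** p is exactly (45 : Int) ^ p.toNat)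
def b45BChar (bytes : List Int) (j : Int) : Char :=
  let n := PySem.List.len bytes
  let full := PySem.Int.floordiv n 2
  let pv : Int × Int :=
    if j < 3 * full then
      let k := PySem.Int.floordiv j 3
      let p := PySem.Int.mod j 3
      (p, PySem.List.pyGetD bytes (2 * k) 0 <<< (8 : Nat) + PySem.List.pyGetD bytes (2 * k + 1) 0)
    else (j - 3 * full, PySem.List.pyGetD bytes (n - 1) 0)
  PySem.List.pyGetD b45Alphabet
    (PySem.Int.mod (PySem.Int.floordiv pv.2 ((45 : Int) ^ pv.1.toNat)) 45) ' '

def b45BChars (bytes : List Int) : List Char :=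
  let n := PySem.List.len bytes
  let full := PySem.Int.floordiv n 2
  (PySem.List.pyRange 0 (3 * full + 2 * PySem.Int.mod n 2) 1).map (b45BChar bytes)

def encode_base45_alt (data : String) : String :=
  String.ofList (b45BChars (data.toList.map (fun c => (c.toNat : Int))))

-- ===== PRECONDITION & SPEC =====
def Spec_encode_base45 (data : String) (out : String) : Prop := out = encode_base45_alt data
instance (data : String) (out : String) : Decidable (Spec_encode_base45 data out) := by unfold Spec_encode_base45; infer_instance

-- ===== CLAIM (what is proved, stated in full; the proofs are below) =====
def Claim_equal_encode_base45 : Prop := ∀ (data : String), Dom_encode_base45 data → Spec_encode_base45 data (encode_base45 data)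

-- ===== LEMMAS AND PROOFS =====

-- proof-side: the three (resp. two) characters both programs produce for one 2-byte (1-byte) chunk
def b45ChunkDigits : List Int → List Char
  | [b0, b1] =>
      let c := PySem.Int.floordiv (b0 <<< (8 : Nat) + b1) (45 * 45)
      let rem := PySem.Int.mod (b0 <<< (8 : Nat) + b1) (45 * 45)
      let b := PySem.Int.floordiv rem 45
      let a := PySem.Int.mod rem 45
      [PySem.List.pyGetD b45Alphabet a ' ', PySem.List.pyGetD b45Alphabet b ' ',
        PySem.List.pyGetD b45Alphabet c ' ']
  | [b0] =>
      let b := PySem.Int.floordiv b0 45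
      let a := PySem.Int.mod b0 45
      [PySem.List.pyGetD b45Alphabet a ' ', PySem.List.pyGetD b45Alphabet b ' ']
  | _ => []

-- proof-side chunk decomposition of the byte list
def b45Chunks : List Int → List (List Int)
  | [] => []
  | [x] => [[x]]
  | x :: y :: rest => [x, y] :: b45Chunks rest

-- A's loop body / trailing branch as named functions (proof-side restatements of A's code)
def b45gA (bytes : List Int) (i : Int) : List Char :=
  let val := PySem.List.pyGetD bytes i 0 <<< (8 : Nat) + PySem.List.pyGetD bytes (i + 1) 0
  let c := PySem.Int.floordiv val (45 * 45)
  let rem := PySem.Int.mod val (45 * 45)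
  let b := PySem.Int.floordiv rem 45
  let a := PySem.Int.mod rem 45
  [PySem.List.pyGetD b45Alphabet a ' ', PySem.List.pyGetD b45Alphabet b ' ',
    PySem.List.pyGetD b45Alphabet c ' ']

def b45TailA (bytes : List Int) : List Char :=
  if PySem.Int.mod (PySem.List.len bytes) 2 ≠ 0 then
    let val := PySem.List.pyGetD bytes (-1) 0
    [PySem.List.pyGetD b45Alphabet (PySem.Int.mod val 45) ' ',
      PySem.List.pyGetD b45Alphabet (PySem.Int.floordiv val 45) ' ']
  else []

lemma b45AChars_eq (bytes : List Int) :
    b45AChars bytes =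
      (PySem.List.pyRange 0 (PySem.List.len bytes - 1) 2).flatMap (b45gA bytes) ++ b45TailA bytes := by
  unfold b45AChars b45gA b45TailA
  rw [PySem.List.foldl_append_eq_flatMap]
  split_ifs <;> simp

lemma b45RangeNorm {α : Type} (l : List α) :
    PySem.List.pyRange 0 (PySem.List.len l - 1) 2 =
      (List.range (l.length / 2)).map (fun k => ((2 * k : Nat) : Int)) := by
  rw [PySem.List.pyRange_of_pos 0 (PySem.List.len l - 1) (by norm_num)]
  simp only [PySem.List.len]
  by_cases h : (0 : Int) < (l.length : Int) - 1
  · rw [if_pos h]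
    have hc : ((l.length : Int) - 1 - 0 + 2 - 1) / 2 = (l.length : Int) / 2 := by omega
    have hc2 : (((l.length : Int)) / 2).toNat = l.length / 2 := by omega
    rw [hc, hc2]
    apply List.map_congr_left
    intro k _
    push_cast; ring
  · rw [if_neg h]
    have : l.length / 2 = 0 := by omega
    simp [this]

lemma b45pyGetD_neg_one_cons {α : Type} (x : α) (l : List α) (d : α) (h : l ≠ []) :
    PySem.List.pyGetD (x :: l) (-1) d = PySem.List.pyGetD l (-1) d := by
  cases l with
  | nil => exact absurd rfl h
  | cons b t =>
      simp [PySem.List.pyGetD, PySem.List.pyGet?_neg_one, List.getLast?_cons_cons]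

lemma b45Tail_cons (x y : Int) (rest : List Int) :
    b45TailA (x :: y :: rest) = b45TailA rest := by
  unfold b45TailA
  have hm : PySem.Int.mod (PySem.List.len (x :: y :: rest)) 2 = PySem.Int.mod (PySem.List.len rest) 2 := by
    simp [PySem.List.len]
    omega
  rw [hm]
  split_ifs with h
  · have hne : rest ≠ [] := by
      intro e; subst e
      simp [PySem.List.len] at h
    rw [b45pyGetD_neg_one_cons x (y :: rest) 0 (by simp),
        b45pyGetD_neg_one_cons y rest 0 hne]
  · rfl

lemma b45g_zero (x y : Int) (rest : List Int) :
    b45gA (x :: y :: rest) ((2 * 0 : Nat) : Int) = b45ChunkDigits [x, y] := by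
  have h1 : ((2 * 0 : Nat) : Int) = ((0 : Nat) : Int) := by norm_num
  have h2 : ((0 : Nat) : Int) + 1 = ((1 : Nat) : Int) := by norm_num
  unfold b45gA b45ChunkDigits
  rw [h1, h2, PySem.List.pyGetD_natCast, PySem.List.pyGetD_natCast]
  rfl

lemma b45g_succ (x y : Int) (rest : List Int) (k : Nat) :
    b45gA (x :: y :: rest) ((2 * (k + 1) : Nat) : Int) = b45gA rest ((2 * k : Nat) : Int) := by
  unfold b45gA
  have e2 : ((2 * (k + 1) : Nat) : Int) + 1 = ((2 * k + 3 : Nat) : Int) := by push_cast; ring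
  have e3 : ((2 * k : Nat) : Int) + 1 = ((2 * k + 1 : Nat) : Int) := by push_cast; ring
  rw [e2, e3, PySem.List.pyGetD_natCast, PySem.List.pyGetD_natCast,
      PySem.List.pyGetD_natCast, PySem.List.pyGetD_natCast]
  have g1 : (x :: y :: rest).getD (2 * (k + 1)) 0 = rest.getD (2 * k) 0 := by
    have : 2 * (k + 1) = (2 * k) + 1 + 1 := by omega
    rw [this, List.getD_cons_succ, List.getD_cons_succ]
  have g2 : (x :: y :: rest).getD (2 * k + 3) 0 = rest.getD (2 * k + 1) 0 := by
    have : 2 * k + 3 = (2 * k + 1) + 1 + 1 := by omega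
    rw [this, List.getD_cons_succ, List.getD_cons_succ]
  rw [g1, g2]

lemma b45step (x y : Int) (rest : List Int) :
    b45AChars (x :: y :: rest) = b45ChunkDigits [x, y] ++ b45AChars rest := by
  rw [b45AChars_eq, b45AChars_eq, b45RangeNorm, b45RangeNorm]
  have hdiv : (x :: y :: rest).length / 2 = rest.length / 2 + 1 := by simp; omega
  rw [hdiv, List.range_succ_eq_map, List.map_cons, List.flatMap_cons, List.flatMap_map,
      List.flatMap_map, List.flatMap_map, b45g_zero, b45Tail_cons]
  have hsucc : ∀ k : Nat, b45gA (x :: y :: rest) ((2 * (Nat.succ k) : Nat) : Int)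
      = b45gA rest ((2 * k : Nat) : Int) := fun k => b45g_succ x y rest k
  simp only [hsucc, List.append_assoc]

lemma b45base1 (x : Int) : b45AChars [x] = b45ChunkDigits [x] := by
  simp [b45AChars, b45ChunkDigits, PySem.List.len, PySem.List.pyRange,
    PySem.List.pyGetD, PySem.List.pyGet?, PySem.List.pyIdx?]

lemma b45Amain (bytes : List Int) :
    b45AChars bytes = (b45Chunks bytes).flatMap b45ChunkDigits := by
  induction bytes using b45Chunks.induct with
  | case1 => rfl
  | case2 x => simp [b45Chunks, b45base1]
  | case3 x y rest ih => rw [b45step, b45Chunks, List.flatMap_cons, ih]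

-- ===== B side =====

-- Nat-indexed output length
def b45M (bytes : List Int) : Nat := 3 * (bytes.length / 2) + 2 * (bytes.length % 2)

lemma b45BChars_eq (bytes : List Int) :
    b45BChars bytes = (List.range (b45M bytes)).map (fun (k : Nat) => b45BChar bytes ((k : Int))) := by
  unfold b45BChars
  simp only [PySem.List.len_eq]
  have hfd : PySem.Int.floordiv ((bytes.length : Nat) : Int) 2 = ((bytes.length / 2 : Nat) : Int) := by
    exact_mod_cast PySem.Int.floordiv_natCast bytes.length 2
  have hmd : PySem.Int.mod ((bytes.length : Nat) : Int) 2 = ((bytes.length % 2 : Nat) : Int) := by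
    exact_mod_cast PySem.Int.mod_natCast bytes.length 2
  rw [hfd, hmd]
  have hm : 3 * ((bytes.length / 2 : Nat) : Int) + 2 * ((bytes.length % 2 : Nat) : Int)
      = ((b45M bytes : Nat) : Int) := by
    unfold b45M; push_cast; ring
  rw [hm, PySem.List.pyRange_zero_natCast, List.map_map]
  rfl

-- evaluating B's body at position j < 3 on a list of ≥ 2 bytes
lemma b45BChar_two (x y : Int) (rest : List Int) (j : Nat) (hj : j < 3) :
    b45BChar (x :: y :: rest) ((j : Nat) : Int)
      = PySem.List.pyGetD b45Alphabet
          (PySem.Int.mod (PySem.Int.floordiv (x <<< (8 : Nat) + y) ((45 : Int) ^ j)) 45) ' ' := by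
  unfold b45BChar
  simp only [PySem.List.len_eq, List.length_cons]
  have hfull : PySem.Int.floordiv ((rest.length + 1 + 1 : Nat) : Int) 2
      = ((rest.length / 2 + 1 : Nat) : Int) := by
    have h := PySem.Int.floordiv_natCast (rest.length + 1 + 1) 2
    rw [show (rest.length + 1 + 1) / 2 = rest.length / 2 + 1 by omega] at h
    exact_mod_cast h
  rw [hfull]
  have hcond : ((j : Nat) : Int) < 3 * ((rest.length / 2 + 1 : Nat) : Int) := by push_cast; omega
  rw [if_pos hcond]
  have hk : PySem.Int.floordiv ((j : Nat) : Int) 3 = 0 := by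
    have h := PySem.Int.floordiv_natCast j 3
    rw [show j / 3 = 0 by omega] at h
    exact_mod_cast h
  have hp : PySem.Int.mod ((j : Nat) : Int) 3 = ((j : Nat) : Int) := by
    have h := PySem.Int.mod_natCast j 3
    rw [show j % 3 = j by omega] at h
    exact_mod_cast h
  rw [hk, hp]
  rw [show (2 * (0 : Int) + 1) = ((1 : Nat) : Int) by norm_num,
      show (2 * (0 : Int)) = ((0 : Nat) : Int) by norm_num,
      PySem.List.pyGetD_natCast, PySem.List.pyGetD_natCast]
  simp

-- the three positional digits of a 2-byte chunk are A's divmod digits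
lemma b45BChar_first (x y : Int) (rest : List Int) (hx : 0 ≤ x ∧ x ≤ 126) (hy : 0 ≤ y ∧ y ≤ 126) :
    [b45BChar (x :: y :: rest) ((0:Nat) : Int), b45BChar (x :: y :: rest) ((1:Nat) : Int),
     b45BChar (x :: y :: rest) ((2:Nat) : Int)] = b45ChunkDigits [x, y] := by
  rw [b45BChar_two x y rest 0 (by omega), b45BChar_two x y rest 1 (by omega),
      b45BChar_two x y rest 2 (by omega)]
  unfold b45ChunkDigits
  have hv : x <<< (8 : Nat) + y = x * 256 + y := by simp [Int.shiftLeft_eq]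
  rw [hv]
  have hb : 0 ≤ x * 256 + y ∧ x * 256 + y < 91125 := by omega
  have i0 : PySem.Int.mod (PySem.Int.floordiv (x * 256 + y) ((45 : Int) ^ (0 : Nat))) 45
      = PySem.Int.mod (PySem.Int.mod (x * 256 + y) (45 * 45)) 45 := by
    rw [pow_zero, PySem.Int.floordiv_eq_ediv_of_pos (by norm_num : (0:Int) < 1),
      PySem.Int.mod_eq_emod_of_pos (by norm_num : (0:Int) < 45),
      PySem.Int.mod_eq_emod_of_pos (by norm_num : (0:Int) < 45 * 45),
      PySem.Int.mod_eq_emod_of_pos (by norm_num : (0:Int) < 45)]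
    omega
  have i1 : PySem.Int.mod (PySem.Int.floordiv (x * 256 + y) ((45 : Int) ^ (1 : Nat))) 45
      = PySem.Int.floordiv (PySem.Int.mod (x * 256 + y) (45 * 45)) 45 := by
    rw [pow_one, PySem.Int.floordiv_eq_ediv_of_pos (by norm_num : (0:Int) < 45),
      PySem.Int.mod_eq_emod_of_pos (by norm_num : (0:Int) < 45),
      PySem.Int.mod_eq_emod_of_pos (by norm_num : (0:Int) < 45 * 45),
      PySem.Int.floordiv_eq_ediv_of_pos (by norm_num : (0:Int) < 45)]
    omega
  have i2 : PySem.Int.mod (PySem.Int.floordiv (x * 256 + y) ((45 : Int) ^ (2 : Nat))) 45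
      = PySem.Int.floordiv (x * 256 + y) (45 * 45) := by
    rw [show ((45 : Int) ^ (2 : Nat)) = 45 * 45 by norm_num,
      PySem.Int.floordiv_eq_ediv_of_pos (by norm_num : (0:Int) < 45 * 45),
      PySem.Int.mod_eq_emod_of_pos (by norm_num : (0:Int) < 45)]
    omega
  rw [i0, i1, i2]
  simp [hv]

-- shift: character 3 + k of (x :: y :: rest) is character k of rest
lemma b45BChar_shift (x y : Int) (rest : List Int) (k : Nat) (hk : k < b45M rest) :
    b45BChar (x :: y :: rest) ((3 + k : Nat) : Int) = b45BChar rest (k : Int) := by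
  unfold b45BChar
  simp only [PySem.List.len_eq, List.length_cons]
  have hfull : PySem.Int.floordiv ((rest.length + 1 + 1 : Nat) : Int) 2
      = ((rest.length / 2 + 1 : Nat) : Int) := by
    have h := PySem.Int.floordiv_natCast (rest.length + 1 + 1) 2
    rw [show (rest.length + 1 + 1) / 2 = rest.length / 2 + 1 by omega] at h
    exact_mod_cast h
  have hfull' : PySem.Int.floordiv ((rest.length : Nat) : Int) 2 = ((rest.length / 2 : Nat) : Int) := by
    exact_mod_cast PySem.Int.floordiv_natCast rest.length 2
  rw [hfull, hfull']
  by_cases hc : (k : Int) < 3 * ((rest.length / 2 : Nat) : Int)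
  · have hc' : ((3 + k : Nat) : Int) < 3 * ((rest.length / 2 + 1 : Nat) : Int) := by
      push_cast at hc ⊢; omega
    rw [if_pos hc', if_pos hc]
    have hk1 : PySem.Int.floordiv ((3 + k : Nat) : Int) 3 = ((k / 3 + 1 : Nat) : Int) := by
      have h := PySem.Int.floordiv_natCast (3 + k) 3
      rw [show (3 + k) / 3 = k / 3 + 1 by omega] at h
      exact_mod_cast h
    have hk2 : PySem.Int.floordiv ((k : Nat) : Int) 3 = ((k / 3 : Nat) : Int) := by
      exact_mod_cast PySem.Int.floordiv_natCast k 3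
    have hp1 : PySem.Int.mod ((3 + k : Nat) : Int) 3 = ((k % 3 : Nat) : Int) := by
      have h := PySem.Int.mod_natCast (3 + k) 3
      rw [show (3 + k) % 3 = k % 3 by omega] at h
      exact_mod_cast h
    have hp2 : PySem.Int.mod ((k : Nat) : Int) 3 = ((k % 3 : Nat) : Int) := by
      exact_mod_cast PySem.Int.mod_natCast k 3
    rw [hk1, hk2, hp1, hp2]
    have e1 : 2 * ((k / 3 + 1 : Nat) : Int) = ((2 * (k / 3) + 1 + 1 : Nat) : Int) := by
      push_cast; ring
    have e3 : 2 * ((k / 3 : Nat) : Int) = ((2 * (k / 3) : Nat) : Int) := by push_cast; ring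
    rw [e1, e3,
      show ((2 * (k / 3) + 1 + 1 : Nat) : Int) + 1 = ((2 * (k / 3) + 1 + 1 + 1 : Nat) : Int) by
        push_cast; ring,
      show ((2 * (k / 3) : Nat) : Int) + 1 = ((2 * (k / 3) + 1 : Nat) : Int) by push_cast; ring,
      PySem.List.pyGetD_natCast, PySem.List.pyGetD_natCast,
      PySem.List.pyGetD_natCast, PySem.List.pyGetD_natCast]
    rw [show 2 * (k / 3) + 1 + 1 + 1 = (2 * (k / 3) + 1) + 1 + 1 by omega]
    rw [List.getD_cons_succ, List.getD_cons_succ, List.getD_cons_succ, List.getD_cons_succ]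
  · have hodd : rest.length % 2 = 1 := by
      unfold b45M at hk
      push_cast at hc
      omega
    have hc' : ¬ ((3 + k : Nat) : Int) < 3 * ((rest.length / 2 + 1 : Nat) : Int) := by
      push_cast at hc ⊢; omega
    rw [if_neg hc', if_neg hc]
    have hL : 1 ≤ rest.length := by omega
    have hv : ((rest.length + 1 + 1 : Nat) : Int) - 1 = ((rest.length - 1 + 1 + 1 : Nat) : Int) := by
      push_cast [hL]; omega
    have hv' : ((rest.length : Nat) : Int) - 1 = ((rest.length - 1 : Nat) : Int) := by
      push_cast [hL]; omega
    rw [hv, hv', PySem.List.pyGetD_natCast, PySem.List.pyGetD_natCast,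
      List.getD_cons_succ, List.getD_cons_succ]
    have hpe : ((3 + k : Nat) : Int) - 3 * ((rest.length / 2 + 1 : Nat) : Int)
        = ((k : Nat) : Int) - 3 * ((rest.length / 2 : Nat) : Int) := by push_cast; ring
    rw [hpe]

lemma b45Bbase1 (x : Int) (hx : 0 ≤ x ∧ x ≤ 126) : b45BChars [x] = b45ChunkDigits [x] := by
  have h1 : b45BChars [x] = [b45BChar [x] 0, b45BChar [x] 1] := by
    unfold b45BChars
    rfl
  rw [h1]
  have h2 : b45BChar [x] 0 = PySem.List.pyGetD b45Alphabet
      (PySem.Int.mod (PySem.Int.floordiv x ((45 : Int) ^ (0 : Nat))) 45) ' ' := rfl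
  have h3 : b45BChar [x] 1 = PySem.List.pyGetD b45Alphabet
      (PySem.Int.mod (PySem.Int.floordiv x ((45 : Int) ^ (1 : Nat))) 45) ' ' := rfl
  rw [h2, h3]
  unfold b45ChunkDigits
  have i0 : PySem.Int.mod (PySem.Int.floordiv x ((45 : Int) ^ (0 : Nat))) 45
      = PySem.Int.mod x 45 := by
    rw [pow_zero, PySem.Int.floordiv_eq_ediv_of_pos (by norm_num : (0:Int) < 1),
      PySem.Int.mod_eq_emod_of_pos (by norm_num : (0:Int) < 45),
      PySem.Int.mod_eq_emod_of_pos (by norm_num : (0:Int) < 45)]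
    omega
  have i1 : PySem.Int.mod (PySem.Int.floordiv x ((45 : Int) ^ (1 : Nat))) 45
      = PySem.Int.floordiv x 45 := by
    rw [pow_one, PySem.Int.floordiv_eq_ediv_of_pos (by norm_num : (0:Int) < 45),
      PySem.Int.mod_eq_emod_of_pos (by norm_num : (0:Int) < 45)]
    omega
  rw [i0, i1]

lemma b45Bmain : ∀ (bytes : List Int), (∀ b ∈ bytes, 0 ≤ b ∧ b ≤ 126) →
    b45BChars bytes = (b45Chunks bytes).flatMap b45ChunkDigits := by
  intro bytes
  induction bytes using b45Chunks.induct with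
  | case1 => intro _; rfl
  | case2 x => intro hb; simp [b45Chunks, b45Bbase1 x (hb x (by simp))]
  | case3 x y rest ih =>
      intro hb
      have hM : b45M (x :: y :: rest) = 3 + b45M rest := by
        simp [b45M]; omega
      rw [b45BChars_eq, hM, List.range_add, List.map_append, List.map_map]
      have h3 : (List.range 3).map (fun (k : Nat) => b45BChar (x :: y :: rest) ((k : Int)))
          = b45ChunkDigits [x, y] := by
        rw [show List.range 3 = [0, 1, 2] from rfl, List.map_cons, List.map_cons,
          List.map_cons, List.map_nil]
        exact b45BChar_first x y rest (hb x (by simp)) (hb y (by simp))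
      have hsh : ∀ k ∈ List.range (b45M rest),
          b45BChar (x :: y :: rest) (((3 + k : Nat) : Int)) = b45BChar rest (k : Int) := by
        intro k hk
        exact b45BChar_shift x y rest k (List.mem_range.mp hk)
      rw [h3]
      have : (List.range (b45M rest)).map
            ((fun (k : Nat) => b45BChar (x :: y :: rest) ((k : Int))) ∘ (fun k => 3 + k))
          = (List.range (b45M rest)).map (fun (k : Nat) => b45BChar rest ((k : Int))) := by
        apply List.map_congr_left
        intro k hk
        exact hsh k hk
      rw [this, ← b45BChars_eq, b45Chunks, List.flatMap_cons,
        ih (fun b hbm => hb b (by simp [hbm]))]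

lemma b45bounds (data : String) (h : Dom_encode_base45 data) :
    ∀ b ∈ data.toList.map (fun c => (c.toNat : Int)), 0 ≤ b ∧ b ≤ 126 := by
  intro b hb
  simp only [List.mem_map] at hb
  obtain ⟨c, hc, rfl⟩ := hb
  have := List.all_eq_true.mp h c hc
  simp [pvDomChar] at this
  omega

-- ===== VERDICT (by name: the statement is the Claim_ definition above) =====
theorem encode_base45_spec : Claim_equal_encode_base45 := by
  intro data hdom
  unfold Spec_encode_base45 encode_base45 encode_base45_alt
  rw [b45Amain, b45Bmain _ (b45bounds data hdom)]
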